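-- pv_equiv track=rewrite | github.com/ARC2020/arc-cv | pipeline/LaneDetect.py | laneOut
-- ===== SOURCE A (Python) =====
-- def laneOut(lhs, rhs, length):
--     out = []
--     for i in range(length):
--         if i >= lhs and i <= rhs:
--             out.append(1)
--         else:
--             out.append(0)
--     return out
-- ===== SOURCE B (Python) =====
-- def laneOut(lhs, rhs, length):
--     lo = max(0, lhs)
--     hi = min(length - 1, rhs)
--     if length <= 0 or lo > hi:
--         return [0] * max(0, length)
--     return [0] * lo + [1] * (hi - lo + 1) + [0] * (length - 1 - hi)
-- ===== Notes on version B (the rewrite author's own statement) =====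
-- stated objective: simpler
-- what changed: B computes the clamped bounds of the in-range segment and concatenates three homogeneous blocks ([0]*lo + [1]*run + [0]*rest) instead of looping over every index and testing it.
import Mathlib
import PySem

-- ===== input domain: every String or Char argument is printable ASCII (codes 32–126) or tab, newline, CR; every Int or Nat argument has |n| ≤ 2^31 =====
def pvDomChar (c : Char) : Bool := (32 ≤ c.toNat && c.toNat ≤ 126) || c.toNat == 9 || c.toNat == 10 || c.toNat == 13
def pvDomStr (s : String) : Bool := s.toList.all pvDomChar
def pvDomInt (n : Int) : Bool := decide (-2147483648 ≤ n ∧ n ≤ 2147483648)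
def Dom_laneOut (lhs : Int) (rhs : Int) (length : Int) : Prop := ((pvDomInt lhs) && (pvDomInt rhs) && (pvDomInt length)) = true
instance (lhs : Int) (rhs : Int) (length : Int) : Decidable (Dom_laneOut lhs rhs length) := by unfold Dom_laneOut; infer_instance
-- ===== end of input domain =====

-- B builds the 0/1 mask by concatenating three homogeneous blocks from clamped
-- bounds instead of A's per-index loop with a range test (objective: simpler).

-- ===== PORT A =====
def laneOut (lhs : Int) (rhs : Int) (length : Int) : List Int :=
  (PySem.List.pyRange 0 length 1).foldl
    (fun out i => out ++ [if lhs ≤ i ∧ i ≤ rhs then (1 : Int) else 0]) []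

-- ===== PORT B =====
def laneOut_alt (lhs : Int) (rhs : Int) (length : Int) : List Int :=
  let lo := max 0 lhs
  let hi := min (length - 1) rhs
  if length ≤ 0 ∨ lo > hi then List.replicate (max 0 length).toNat 0
  else List.replicate lo.toNat 0 ++ (List.replicate (hi - lo + 1).toNat 1
         ++ List.replicate (length - 1 - hi).toNat 0)

-- ===== PRECONDITION & SPEC =====
def Spec_laneOut (lhs : Int) (rhs : Int) (length : Int) (out : List Int) : Prop := out = laneOut_alt lhs rhs length
instance (lhs : Int) (rhs : Int) (length : Int) (out : List Int) : Decidable (Spec_laneOut lhs rhs length out) := by unfold Spec_laneOut; infer_instance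

-- ===== CLAIM (what is proved, stated in full; the proofs are below) =====
def Claim_equal_laneOut : Prop := ∀ (lhs : Int) (rhs : Int) (length : Int), Dom_laneOut lhs rhs length → Spec_laneOut lhs rhs length (laneOut lhs rhs length)

-- ===== LEMMAS AND PROOFS =====

theorem foldl_append_singleton {α β : Type} (f : α → β) :
    ∀ (l : List α) (acc : List β),
      l.foldl (fun out i => out ++ [f i]) acc = acc ++ l.map f := by
  intro l
  induction l with
  | nil => intro acc; simp
  | cons x xs ih => intro acc; simp [List.foldl, ih]

theorem laneOut_eq_map (lhs rhs length : Int) :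
    laneOut lhs rhs length =
      (List.range length.toNat).map
        (fun (k : Nat) => if lhs ≤ (k : Int) ∧ (k : Int) ≤ rhs then (1 : Int) else 0) := by
  unfold laneOut
  rw [foldl_append_singleton, PySem.List.pyRange_one, List.map_map]
  simp [Function.comp]

theorem laneOut_alt_eq_map (lhs rhs length : Int) :
    laneOut_alt lhs rhs length =
      (List.range length.toNat).map
        (fun (k : Nat) => if lhs ≤ (k : Int) ∧ (k : Int) ≤ rhs then (1 : Int) else 0) := by
  unfold laneOut_alt
  dsimp only
  split_ifs with h
  · -- empty-mask case: every index fails the range test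
    apply List.ext_getElem
    · simp; omega
    · intro k hk hk'
      have hkl : k < length.toNat := by simpa using hk'
      simp only [List.getElem_replicate, List.getElem_map, List.getElem_range]
      rw [if_neg (by omega)]
  · push Not at h
    obtain ⟨h1, h2⟩ := h
    apply List.ext_getElem
    · simp; omega
    · intro k hk hk'
      have hkl : k < length.toNat := by simpa using hk'
      simp only [List.getElem_map, List.getElem_range]
      by_cases hA : (k : Int) < max 0 lhs
      · rw [List.getElem_append_left (by simp only [List.length_replicate]; omega),
            List.getElem_replicate, if_neg (by omega)]
      · rw [List.getElem_append_right (by simp only [List.length_replicate]; omega)]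
        by_cases hB : (k : Int) ≤ min (length - 1) rhs
        · rw [List.getElem_append_left (by simp only [List.length_replicate]; omega),
              List.getElem_replicate, if_pos (by omega)]
        · rw [List.getElem_append_right (by simp only [List.length_replicate]; omega),
              List.getElem_replicate, if_neg (by omega)]

-- ===== VERDICT (by name: the statement is the Claim_ definition above) =====
theorem laneOut_spec : Claim_equal_laneOut := by
  intro lhs rhs length _
  unfold Spec_laneOut
  rw [laneOut_eq_map, laneOut_alt_eq_map]
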